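-- pv_equiv track=rewrite | github.com/agh-bit-academy/SummerProject2022 | WDI/Zestaw_6/Zadanie_27/sol.py | f
-- ===== SOURCE A (Python) =====
-- def field(x1, x2, y1, y2):
--     return (x2 - x1) * (y2 - y1)
--
-- def field_sum(tab):
--     fieldd = 0
--     for square in tab:
--         x1, x2, y1, y2 = square
--         fieldd += field(x1, x2, y1, y2)
--     return fieldd
--
-- def do_they_not_overlap(tab):
--     n = len(tab)
--     x_es = [[] for _ in range(n)]
--     y_es = [[] for _ in range(n)]
--     for i in range(n):
--         x1, x2, y1, y2 = tab[i]
--         x_es[i] += (x1, x2)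
--         y_es[i] += [y1, y2]
--     x_es.sort()
--     y_es.sort()
--
--     x_tmp = x_es[0][0]
--     y_tmp = y_es[0][0]
--     for i in range(len(x_es)):
--         x1, x2 = x_es[i]
--         y1, y2 = y_es[i]
--         if x_tmp > x1 or y_tmp > y1:
--             return False
--         x_tmp = x2
--         y_tmp = y2
--     return True
--
-- def f(tab, i=0, left=13, taken=[]):
--     n = len(tab)
--     if left == 0 and field_sum(taken) == 2012:
--         return True
--     if i == n:
--         return False
--     a = f(tab, i + 1, left, taken)
--     if do_they_not_overlap([*taken, tab[i]]):
--         b = f(tab, i + 1, left - 1, [*taken, tab[i]])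
--     else:
--         b = False
--     if a or b:
--         return True
--     else:
--         return False
-- ===== SOURCE B (Python) =====
-- def field(x1, x2, y1, y2):
--     return (x2 - x1) * (y2 - y1)
--
-- def field_sum(tab):
--     fieldd = 0
--     for square in tab:
--         x1, x2, y1, y2 = square
--         fieldd += field(x1, x2, y1, y2)
--     return fieldd
--
-- def do_they_not_overlap(tab):
--     n = len(tab)
--     x_es = [[] for _ in range(n)]
--     y_es = [[] for _ in range(n)]
--     for i in range(n):
--         x1, x2, y1, y2 = tab[i]
--         x_es[i] += (x1, x2)
--         y_es[i] += [y1, y2]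
--     x_es.sort()
--     y_es.sort()
--
--     x_tmp = x_es[0][0]
--     y_tmp = y_es[0][0]
--     for i in range(len(x_es)):
--         x1, x2 = x_es[i]
--         y1, y2 = y_es[i]
--         if x_tmp > x1 or y_tmp > y1:
--             return False
--         x_tmp = x2
--         y_tmp = y2
--     return True
--
--
-- def _combos(lst, k):
--     """All k-element sublists of lst, in lexicographic (by position) order."""
--     if k == 0:
--         return [[]]
--     if not lst:
--         return []
--     rest = lst[1:]
--     return [[lst[0]] + c for c in _combos(rest, k - 1)] + _combos(rest, k)
--
--
-- def f(tab, i=0, left=13, taken=[]):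
--     n = len(tab)
--     if left < 0:
--         return False
--     if left == 0:
--         return field_sum(taken) == 2012
--     pool = [tab[j] for j in range(i, n)]
--     for c in _combos(pool, left):
--         chosen = taken + c
--         if field_sum(chosen) == 2012 and do_they_not_overlap(chosen):
--             return True
--     return False
-- ===== Notes on version B (the rewrite author's own statement) =====
-- stated objective: alternative
-- what changed: A's pruned double recursion (take/skip each index, re-checking overlap at every extension) is replaced by a generate-and-test enumeration of the `left`-element combinations of the remaining rectangles, checking area sum and non-overlap only once per full candidate; this is equivalent because the overlap test is monotone under sub-multisets.
-- outside the precondition, e.g. on f([], -1, 0, [(0, 2, 0, 1006)]): A returns True, B returns True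
import Mathlib
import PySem

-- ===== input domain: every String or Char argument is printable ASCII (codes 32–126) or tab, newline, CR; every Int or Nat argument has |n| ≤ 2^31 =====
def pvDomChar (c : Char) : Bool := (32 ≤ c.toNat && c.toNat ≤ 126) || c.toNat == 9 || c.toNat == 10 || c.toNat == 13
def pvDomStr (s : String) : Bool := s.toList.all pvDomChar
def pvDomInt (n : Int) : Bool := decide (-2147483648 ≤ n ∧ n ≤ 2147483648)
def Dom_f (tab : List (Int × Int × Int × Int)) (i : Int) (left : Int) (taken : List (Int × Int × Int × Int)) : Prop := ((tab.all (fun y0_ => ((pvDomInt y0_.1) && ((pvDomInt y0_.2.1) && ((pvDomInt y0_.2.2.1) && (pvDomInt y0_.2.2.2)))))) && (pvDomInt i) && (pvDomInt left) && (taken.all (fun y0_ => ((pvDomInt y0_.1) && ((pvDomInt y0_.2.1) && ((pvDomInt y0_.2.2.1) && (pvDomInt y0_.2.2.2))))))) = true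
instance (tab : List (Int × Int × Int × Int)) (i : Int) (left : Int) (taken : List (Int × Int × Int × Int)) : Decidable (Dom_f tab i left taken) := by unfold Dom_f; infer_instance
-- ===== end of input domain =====

-- B replaces A's prune-as-you-go double recursion by a generate-and-test enumeration of the
-- `left`-element combinations of the remaining rectangles (objective: alternative decomposition;
-- same return value on every input satisfying Pre_f).

-- ===== PORT A =====
-- helper `field` of the Python module
def pvField (x1 x2 y1 y2 : Int) : Int := (x2 - x1) * (y2 - y1)

-- helper `field_sum`
def pvFieldSum (tab : List (Int × Int × Int × Int)) : Int :=
  tab.foldl (fun acc r => acc + pvField r.1 r.2.1 r.2.2.1 r.2.2.2) 0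

-- the single loop of `do_they_not_overlap` over the two sorted interval lists (zipped)
def pvChain2 : Int → Int → List ((Int × Int) × (Int × Int)) → Bool
  | _, _, [] => true
  | xt, yt, (xi, yi) :: rest =>
    if xt > xi.1 || yt > yi.1 then false else pvChain2 xi.2 yi.2 rest

-- helper `do_they_not_overlap`: Python sorts the lists [x1,x2] lexicographically — sorted2 with
-- the two component keys is exactly that.  On the empty list Python raises IndexError; both
-- programs only ever call this helper on nonempty lists, so the `true` branch is unreachable there.
def pvNotOverlap (tab : List (Int × Int × Int × Int)) : Bool :=
  let xs := PySem.List.sorted2 (tab.map fun r => (r.1, r.2.1)) Prod.fst Prod.snd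
  let ys := PySem.List.sorted2 (tab.map fun r => (r.2.2.1, r.2.2.2)) Prod.fst Prod.snd
  match xs, ys with
  | x0 :: _, y0 :: _ => pvChain2 x0.1 y0.1 (xs.zip ys)
  | _, _ => true

-- tab[j]; inside Pre_f every index either is in Python's (negative-wrap) range or is never
-- reached, so the default of getD is never observable
def pvGetR (tab : List (Int × Int × Int × Int)) (j : Int) : Int × Int × Int × Int :=
  (PySem.List.pyGet? tab j).getD (0, 0, 0, 0)

-- A's recursion; fuel = n - i, which inside Pre_f is exactly the number of remaining indices,
-- so the fuel-0 branch is Python's `i == n` branch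
def fAux (tab : List (Int × Int × Int × Int)) : Nat → Int → Int → List (Int × Int × Int × Int) → Bool
  | fuel, i, left, taken =>
    if left = 0 ∧ pvFieldSum taken = 2012 then true
    else
      match fuel with
      | 0 => false
      | fuel + 1 =>
        let a := fAux tab fuel (i + 1) left taken
        let b := if pvNotOverlap (taken ++ [pvGetR tab i])
                 then fAux tab fuel (i + 1) (left - 1) (taken ++ [pvGetR tab i])
                 else false
        a || b

def f (tab : List (Int × Int × Int × Int)) (i : Int) (left : Int) (taken : List (Int × Int × Int × Int)) : Bool :=
  fAux tab (((tab.length : Int) - i).toNat) i left taken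

-- ===== PORT B =====
-- Source B's hand-written `_combos` has literally the structural equations of
-- PySem.List.combinations (combinations_zero / combinations_nil_succ / combinations_cons_succ),
-- in the same order, so that function IS its port.
def f_alt (tab : List (Int × Int × Int × Int)) (i : Int) (left : Int) (taken : List (Int × Int × Int × Int)) : Bool :=
  if left < 0 then false
  else if left = 0 then decide (pvFieldSum taken = 2012)
  else
    let pool := (PySem.List.pyRange i (tab.length : Int) 1).map (pvGetR tab)
    (PySem.List.combinations pool left.toNat).any fun c =>
      decide (pvFieldSum (taken ++ c) = 2012) && pvNotOverlap (taken ++ c)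

-- ===== PRECONDITION & SPEC =====
-- Pre_f excludes exactly the start indices outside [-len(tab), len(tab)]: there A's recursion
-- runs off the table — IndexError for i < -n, unbounded recursion (RecursionError) for i > n —
-- except when the `left == 0 and field_sum(taken) == 2012` shortcut fires before any table
-- access, where A returns True and B returns True as well.
def Pre_f (tab : List (Int × Int × Int × Int)) (i : Int) (left : Int) (taken : List (Int × Int × Int × Int)) : Prop :=
  -(tab.length : Int) ≤ i ∧ i ≤ (tab.length : Int)
instance (tab : List (Int × Int × Int × Int)) (i : Int) (left : Int) (taken : List (Int × Int × Int × Int)) : Decidable (Pre_f tab i left taken) := by unfold Pre_f; infer_instance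

def pvWitness_f : (List (Int × Int × Int × Int)) × Int × Int × (List (Int × Int × Int × Int)) :=
  ([(0, 1, 0, 2012)], 0, 1, [])

def Spec_f (tab : List (Int × Int × Int × Int)) (i : Int) (left : Int) (taken : List (Int × Int × Int × Int)) (out : Bool) : Prop := out = f_alt tab i left taken
instance (tab : List (Int × Int × Int × Int)) (i : Int) (left : Int) (taken : List (Int × Int × Int × Int)) (out : Bool) : Decidable (Spec_f tab i left taken out) := by unfold Spec_f; infer_instance

-- ===== CLAIM (what is proved, stated in full; the proofs are below) =====
def Claim_equal_f : Prop := ∀ (tab : List (Int × Int × Int × Int)) (i : Int) (left : Int) (taken : List (Int × Int × Int × Int)), Dom_f tab i left taken → Pre_f tab i left taken → Spec_f tab i left taken (f tab i left taken)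

-- ===== LEMMAS AND PROOFS =====

-- The strict lexicographic order Python's list.sort uses on the two-element lists [x1, x2];
-- definitionally the `before` test inside pvNotOverlap's sorted2.
def pvLexLt (a b : Int × Int) : Bool :=
  decide (a.1 < b.1) || (!decide (b.1 < a.1) && decide (a.2 < b.2))

-- `a ≤ b` in that order
def pvLexLe (a b : Int × Int) : Prop := pvLexLt b a = false

lemma pvLexLe_iff (a b : Int × Int) :
    pvLexLe a b ↔ (a.1 < b.1 ∨ (a.1 = b.1 ∧ a.2 ≤ b.2)) := by
  simp [pvLexLe, pvLexLt]; omega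

lemma pvLexLe_trans {a b c : Int × Int} (h1 : pvLexLe a b) (h2 : pvLexLe b c) : pvLexLe a c := by
  rw [pvLexLe_iff] at *; omega

lemma pvLexLe_fst {a b : Int × Int} (h : pvLexLe a b) : a.1 ≤ b.1 := by
  rw [pvLexLe_iff] at h; omega

lemma pvLexLe_antisymm {a b : Int × Int} (h1 : pvLexLe a b) (h2 : pvLexLe b a) : a = b := by
  rw [pvLexLe_iff] at h1 h2
  have : a.1 = b.1 ∧ a.2 = b.2 := by omega
  exact Prod.ext this.1 this.2

-- insertion into a pvLexLe-sorted list keeps it sorted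
lemma insertBy_lex_pairwise (x : Int × Int) (l : List (Int × Int))
    (h : l.Pairwise pvLexLe) : (PySem.List.insertBy pvLexLt x l).Pairwise pvLexLe := by
  induction l with
  | nil => simp [PySem.List.insertBy]
  | cons y ys ih =>
    rw [List.pairwise_cons] at h
    obtain ⟨hy, hys⟩ := h
    by_cases hb : pvLexLt x y = true
    · have hxy : pvLexLe x y := by
        rw [pvLexLe_iff]; simp [pvLexLt] at hb; omega
      simp only [PySem.List.insertBy, hb, if_pos]
      refine List.Pairwise.cons ?_ (List.Pairwise.cons hy hys)
      intro z hz
      rw [List.mem_cons] at hz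
      rcases hz with rfl | hz
      · exact hxy
      · exact pvLexLe_trans hxy (hy z hz)
    · have hyx : pvLexLe y x := by
        simp only [pvLexLe]; simpa using hb
      simp only [PySem.List.insertBy, hb, if_neg, Bool.false_eq_true, not_false_iff]
      refine List.Pairwise.cons ?_ (ih hys)
      intro z hz
      rw [PySem.List.mem_insertBy] at hz
      rcases hz with rfl | hz
      · exact hyx
      · exact hy z hz

lemma foldl_insertBy_pairwise (l acc : List (Int × Int))
    (h : acc.Pairwise pvLexLe) :
    (l.foldl (fun acc x => PySem.List.insertBy pvLexLt x acc) acc).Pairwise pvLexLe := by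
  induction l generalizing acc with
  | nil => simpa
  | cons x xs ih => exact ih _ (insertBy_lex_pairwise x acc h)

-- sorted2 with the two component keys is insertion sort along pvLexLt (definitional)
lemma sorted2_lex_pairwise (l : List (Int × Int)) :
    (PySem.List.sorted2 l Prod.fst Prod.snd).Pairwise pvLexLe :=
  foldl_insertBy_pairwise l [] (by simp)

-- single-list chain check: the x-half (resp. y-half) of the Python loop
def pvChain1 : Int → List (Int × Int) → Bool
  | _, [] => true
  | t, a :: rest => if t > a.1 then false else pvChain1 a.2 rest

lemma pvChain2_eq (xs ys : List (Int × Int)) (xt yt : Int) (h : xs.length = ys.length) :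
    pvChain2 xt yt (xs.zip ys) = (pvChain1 xt xs && pvChain1 yt ys) := by
  induction xs generalizing ys xt yt with
  | nil =>
    cases ys with
    | nil => simp [pvChain2, pvChain1]
    | cons b bs => simp at h
  | cons a as ih =>
    cases ys with
    | nil => simp at h
    | cons b bs =>
      have hlen : as.length = bs.length := by simpa using h
      by_cases h1 : xt > a.1 <;> by_cases h2 : yt > b.1 <;>
        simp [pvChain2, pvChain1, h1, h2, ih _ _ _ hlen]

-- the separation relation the chain certifies between two intervals
def pvSep (a b : Int × Int) : Prop := a.2 ≤ b.1

lemma pvChain1_iff (l : List (Int × Int)) (t : Int)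
    (hmono : l.Pairwise (fun a b => a.1 ≤ b.1)) :
    pvChain1 t l = true ↔ ((∀ a ∈ l.head?, t ≤ a.1) ∧ l.Pairwise pvSep) := by
  induction l generalizing t with
  | nil => simp [pvChain1]
  | cons a r ih =>
    rw [List.pairwise_cons] at hmono
    obtain ⟨ha, hr⟩ := hmono
    by_cases h1 : t > a.1
    · simp [pvChain1, h1]
    · rw [List.pairwise_cons]
      simp only [pvChain1, if_neg h1, ih _ hr, List.head?_cons, Option.mem_some_iff]
      constructor
      · rintro ⟨hh, hp⟩
        refine ⟨fun x hx => by rw [← hx]; omega, fun b hb => ?_, hp⟩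
        cases r with
        | nil => simp at hb
        | cons c cs =>
          have hc : a.2 ≤ c.1 := hh c (by simp)
          rw [List.mem_cons] at hb
          rcases hb with rfl | hb
          · exact hc
          · have : c.1 ≤ b.1 := by
              rw [List.pairwise_cons] at hr
              exact hr.1 b hb
            exact le_trans hc this
      · rintro ⟨_, hsep, hp⟩
        refine ⟨fun x hx => ?_, hp⟩
        cases r with
        | nil => simp at hx
        | cons c cs =>
          simp at hx
          rw [← hx]
          exact hsep c (by simp)

-- the two sorted projection lists of pvNotOverlap
def sortX (l : List (Int × Int × Int × Int)) : List (Int × Int) :=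
  PySem.List.sorted2 (l.map fun r => (r.1, r.2.1)) Prod.fst Prod.snd
def sortY (l : List (Int × Int × Int × Int)) : List (Int × Int) :=
  PySem.List.sorted2 (l.map fun r => (r.2.2.1, r.2.2.2)) Prod.fst Prod.snd

lemma length_sortX (l : List (Int × Int × Int × Int)) : (sortX l).length = l.length := by
  simpa [sortX] using ((PySem.List.sorted2_perm (l.map fun r => (r.1, r.2.1)) Prod.fst Prod.snd false).length_eq).trans (by simp)
lemma length_sortY (l : List (Int × Int × Int × Int)) : (sortY l).length = l.length := by
  simpa [sortY] using ((PySem.List.sorted2_perm (l.map fun r => (r.2.2.1, r.2.2.2)) Prod.fst Prod.snd false).length_eq).trans (by simp)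

lemma pvNotOverlap_iff (l : List (Int × Int × Int × Int)) (hne : l ≠ []) :
    pvNotOverlap l = true ↔ ((sortX l).Pairwise pvSep ∧ (sortY l).Pairwise pvSep) := by
  have hlx : (sortX l).length = l.length := length_sortX l
  have hly : (sortY l).length = l.length := length_sortY l
  have hpos : 0 < l.length := List.length_pos_iff.mpr hne
  cases hxs : sortX l with
  | nil => rw [hxs] at hlx; simp at hlx; omega
  | cons x0 xt =>
    cases hys : sortY l with
    | nil => rw [hys] at hly; simp at hly; omega
    | cons y0 yt =>
      have e : pvNotOverlap l = pvChain2 x0.1 y0.1 ((sortX l).zip (sortY l)) := by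
        simp only [pvNotOverlap, sortX, sortY] at *
        rw [hxs, hys]
      rw [e, pvChain2_eq _ _ _ _ (by omega)]
      have hmx : (sortX l).Pairwise (fun a b => a.1 ≤ b.1) :=
        (sorted2_lex_pairwise _).imp (fun h => pvLexLe_fst h)
      have hmy : (sortY l).Pairwise (fun a b => a.1 ≤ b.1) :=
        (sorted2_lex_pairwise _).imp (fun h => pvLexLe_fst h)
      rw [Bool.and_eq_true, pvChain1_iff _ _ hmx, pvChain1_iff _ _ hmy, hxs, hys]
      simp

lemma subperm_map {α β : Type} (g : α → β) {l' l : List α} (h : l'.Subperm l) :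
    (l'.map g).Subperm (l.map g) := by
  obtain ⟨s, hp, hs⟩ := h
  exact ⟨s.map g, hp.map g, hs.map g⟩

lemma sorted2_subperm_sublist {l₁ l₂ : List (Int × Int)} (h : l₁.Subperm l₂) :
    (PySem.List.sorted2 l₁ Prod.fst Prod.snd).Sublist (PySem.List.sorted2 l₂ Prod.fst Prod.snd) := by
  have hsub : (PySem.List.sorted2 l₁ Prod.fst Prod.snd).Subperm (PySem.List.sorted2 l₂ Prod.fst Prod.snd) := by
    refine List.Subperm.trans ?_ ((PySem.List.sorted2_perm l₂ Prod.fst Prod.snd false).symm.subperm)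
    exact ((PySem.List.sorted2_perm l₁ Prod.fst Prod.snd false).subperm).trans h
  exact @List.sublist_of_subperm_of_pairwise _ pvLexLe ⟨fun _ _ h1 h2 => pvLexLe_antisymm h1 h2⟩ _ _
    hsub (sorted2_lex_pairwise l₁) (sorted2_lex_pairwise l₂)

-- KEY: not-overlapping is inherited by every nonempty sub-multiset (the x-projections of the
-- subset, once sorted, form a sublist of the sorted x-projections of the whole, and the
-- separation Pairwise restricts to sublists; same for y)
lemma pvNotOverlap_mono {l' l : List (Int × Int × Int × Int)}
    (hsub : l'.Subperm l) (hne : l' ≠ []) (h : pvNotOverlap l = true) :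
    pvNotOverlap l' = true := by
  have hne2 : l ≠ [] := by
    intro hl; subst hl
    exact hne (List.subperm_nil.mp hsub)
  rw [pvNotOverlap_iff _ hne2] at h
  rw [pvNotOverlap_iff _ hne]
  exact ⟨List.Pairwise.sublist (sorted2_subperm_sublist (subperm_map _ hsub)) h.1,
         List.Pairwise.sublist (sorted2_subperm_sublist (subperm_map _ hsub)) h.2⟩

-- A's recursion rephrased as a structural recursion over the list of remaining rectangles
def pvG : List (Int × Int × Int × Int) → Int → List (Int × Int × Int × Int) → Bool
  | [], left, taken => decide (left = 0 ∧ pvFieldSum taken = 2012)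
  | e :: rest, left, taken =>
    if left = 0 ∧ pvFieldSum taken = 2012 then true
    else
      pvG rest left taken ||
        (if pvNotOverlap (taken ++ [e]) then pvG rest (left - 1) (taken ++ [e]) else false)

lemma fAux_eq_pvG (tab : List (Int × Int × Int × Int)) (fuel : Nat) :
    ∀ (i left : Int) (taken : List (Int × Int × Int × Int)),
      (fuel : Int) = (tab.length : Int) - i →
      fAux tab fuel i left taken =
        pvG ((PySem.List.pyRange i (tab.length : Int) 1).map (pvGetR tab)) left taken := by
  induction fuel with
  | zero =>
    intro i left taken hfuel
    have hi : i = (tab.length : Int) := by omega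
    rw [PySem.List.pyRange_one_eq_nil (by omega)]
    simp only [fAux, pvG, List.map_nil]
    split <;> simp_all
  | succ fuel ih =>
    intro i left taken hfuel
    have hlt : i < (tab.length : Int) := by omega
    rw [PySem.List.pyRange_one_cons hlt, List.map_cons]
    show (if left = 0 ∧ pvFieldSum taken = 2012 then true
      else
        fAux tab fuel (i+1) left taken ||
          (if pvNotOverlap (taken ++ [pvGetR tab i])
           then fAux tab fuel (i+1) (left - 1) (taken ++ [pvGetR tab i]) else false)) = _
    rw [ih (i+1) left taken (by omega), ih (i+1) (left-1) (taken ++ [pvGetR tab i]) (by omega)]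
    rfl

-- the existence characterisation of pvG: the pruning of A is absorbed by pvNotOverlap_mono
lemma pvG_iff (elems : List (Int × Int × Int × Int)) :
    ∀ (left : Int) (taken : List (Int × Int × Int × Int)),
    pvG elems left taken = true ↔
      ((left = 0 ∧ pvFieldSum taken = 2012) ∨
        ∃ c, c.Sublist elems ∧ c ≠ [] ∧ (c.length : Int) = left ∧
          pvFieldSum (taken ++ c) = 2012 ∧ pvNotOverlap (taken ++ c) = true) := by
  induction elems with
  | nil =>
    intro left taken
    simp only [pvG, decide_eq_true_eq, List.sublist_nil]
    constructor
    · exact Or.inl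
    · rintro (h | ⟨c, rfl, hne, _⟩)
      · exact h
      · exact absurd rfl hne
  | cons e rest ih =>
    intro left taken
    by_cases hbase : left = 0 ∧ pvFieldSum taken = 2012
    · simp [pvG, hbase]
    · simp only [pvG, if_neg hbase, Bool.or_eq_true]
      constructor
      · rintro (ha | hb)
        · rcases (ih left taken).mp ha with h | ⟨c, hsub, hne, hlen, hsum, hov⟩
          · exact absurd h hbase
          · exact Or.inr ⟨c, hsub.cons e, hne, hlen, hsum, hov⟩
        · by_cases hov : pvNotOverlap (taken ++ [e]) = true
          · rw [if_pos hov] at hb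
            rcases (ih (left - 1) (taken ++ [e])).mp hb with ⟨h0, hs⟩ | ⟨c', hsub, hne, hlen, hsum, hov'⟩
            · refine Or.inr ⟨[e], ?_, by simp, by simp; omega, hs, hov⟩
              simp
            · refine Or.inr ⟨e :: c', List.Sublist.cons₂ e hsub, by simp, by simp; omega, ?_, ?_⟩
              · simpa [List.append_assoc] using hsum
              · simpa [List.append_assoc] using hov'
          · rw [if_neg hov] at hb
            exact absurd hb (by simp)
      · rintro (h | ⟨c, hsub, hne, hlen, hsum, hov⟩)
        · exact absurd h hbase
        · rw [List.sublist_cons_iff] at hsub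
          rcases hsub with hsub | ⟨c', rfl, hsub⟩
          · exact Or.inl ((ih left taken).mpr (Or.inr ⟨c, hsub, hne, hlen, hsum, hov⟩))
          · refine Or.inr ?_
            have hov1 : pvNotOverlap (taken ++ [e]) = true := by
              refine pvNotOverlap_mono ?_ (by simp) hov
              refine List.Sublist.subperm ?_
              rw [show taken ++ e :: c' = (taken ++ [e]) ++ c' by simp]
              exact List.sublist_append_left _ _
            rw [if_pos hov1]
            refine (ih (left - 1) (taken ++ [e])).mpr ?_
            cases c' with
            | nil =>
              refine Or.inl ⟨by simp at hlen; omega, by simpa using hsum⟩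
            | cons d ds =>
              refine Or.inr ⟨d :: ds, hsub, by simp, by simp at hlen ⊢; omega, ?_, ?_⟩
              · simpa [List.append_assoc] using hsum
              · simpa [List.append_assoc] using hov

-- ===== VERDICT (by name: the statement is the Claim_ definition above) =====
theorem f_spec : Claim_equal_f := by
  intro tab i left taken _ hpre
  obtain ⟨hi1, hi2⟩ := hpre
  unfold Spec_f f f_alt
  have hA : f tab i left taken =
      pvG ((PySem.List.pyRange i (tab.length : Int) 1).map (pvGetR tab)) left taken := by
    unfold f
    exact fAux_eq_pvG tab _ i left taken (by omega)
  rw [show fAux tab (((tab.length : Int) - i).toNat) i left taken = _ from hA]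
  set elems := (PySem.List.pyRange i (tab.length : Int) 1).map (pvGetR tab) with helems
  by_cases hneg : left < 0
  · rw [if_pos hneg, ← Bool.not_eq_true, pvG_iff]
    rintro (⟨h, _⟩ | ⟨c, _, _, hlen, _, _⟩)
    · omega
    · have : (0 : Int) ≤ c.length := by positivity
      omega
  · rw [if_neg hneg]
    by_cases h0 : left = 0
    · rw [if_pos h0, Bool.eq_iff_iff, pvG_iff, decide_eq_true_eq]
      constructor
      · rintro (⟨_, hs⟩ | ⟨c, _, hne, hlen, _, _⟩)
        · exact hs
        · have : 0 < c.length := List.length_pos_iff.mpr hne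
          omega
      · exact fun hs => Or.inl ⟨h0, hs⟩
    · rw [if_neg h0]
      rw [Bool.eq_iff_iff]
      rw [pvG_iff elems left taken, List.any_eq_true]
      constructor
      · rintro (⟨h, _⟩ | ⟨c, hsub, hne, hlen, hsum, hov⟩)
        · exact absurd h h0
        · refine ⟨c, ?_, ?_⟩
          · rw [PySem.List.mem_combinations_iff]
            exact ⟨hsub, by omega⟩
          · simp [hsum, hov]
      · rintro ⟨c, hc, hp⟩
        rw [PySem.List.mem_combinations_iff] at hc
        simp only [Bool.and_eq_true, decide_eq_true_eq] at hp
        refine Or.inr ⟨c, hc.1, ?_, by omega, hp.1, hp.2⟩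
        intro hcnil
        subst hcnil
        simp at hc
        omega
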